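-- pv_equiv track=rewrite | github.com/ColbyZhuang/music2dance_DanceNet | utils/data_utils.py | wavenet_max_fieldofvision
-- ===== SOURCE A (Python) =====
-- def wavenet_max_fieldofvision(max_dilation, n_layers, kernel_size):
--     dilations = []
--     for i in range(n_layers):
--         dilations.append(2 ** (i % max_dilation))
--
--     field = 1 + kernel_size - 1
--     for dilation in reversed(dilations):
--         field += (kernel_size - 1) * dilation
--
--     return field
-- ===== SOURCE B (Python) =====
-- def wavenet_max_fieldofvision(max_dilation, n_layers, kernel_size):
--     # closed form: the dilation pattern 2**(i % max_dilation) is periodic,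
--     # each full period sums to 2**max_dilation - 1, the tail to 2**r - 1.
--     if n_layers <= 0:
--         return kernel_size
--     q, r = divmod(n_layers, max_dilation)
--     if q == 0:
--         period_sum = 2 ** r - 1
--     else:
--         period_sum = q * (2 ** max_dilation - 1) + 2 ** r - 1
--     return kernel_size + (kernel_size - 1) * period_sum
-- ===== Notes on version B (the rewrite author's own statement) =====
-- stated objective: faster
-- what changed: Replaces the O(n_layers) list build and accumulation loop with a closed-form geometric-sum over the periodic dilation pattern (divmod plus two powers of two).
-- outside the precondition, e.g. on wavenet_max_fieldofvision(-2, 1, 3): A returns 5, B returns 3.5; on wavenet_max_fieldofvision(0, 1, 3): A raises ZeroDivisionError, B raises ZeroDivisionError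
import Mathlib
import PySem

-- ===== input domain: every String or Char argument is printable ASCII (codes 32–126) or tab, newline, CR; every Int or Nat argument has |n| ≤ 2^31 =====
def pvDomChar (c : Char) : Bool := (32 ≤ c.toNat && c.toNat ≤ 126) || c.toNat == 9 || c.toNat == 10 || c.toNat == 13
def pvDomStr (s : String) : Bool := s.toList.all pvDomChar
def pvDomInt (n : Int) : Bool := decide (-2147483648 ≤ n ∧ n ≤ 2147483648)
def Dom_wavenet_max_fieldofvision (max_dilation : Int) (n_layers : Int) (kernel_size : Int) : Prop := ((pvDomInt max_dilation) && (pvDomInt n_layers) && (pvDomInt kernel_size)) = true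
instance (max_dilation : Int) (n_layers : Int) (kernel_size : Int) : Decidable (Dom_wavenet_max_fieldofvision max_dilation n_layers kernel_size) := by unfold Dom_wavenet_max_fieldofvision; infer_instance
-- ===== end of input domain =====

-- B replaces A's O(n_layers) loop with a closed-form geometric sum over the periodic dilation pattern (objective: faster).

-- ===== PORT A =====
-- 2 ** (i % max_dilation): under Pre_ the exponent is ≥ 0 (positive divisor), so Int pow on .toNat is exact.
def wavenet_max_fieldofvision (max_dilation : Int) (n_layers : Int) (kernel_size : Int) : Int :=
  let dilations := (PySem.List.pyRange 0 n_layers 1).map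
    (fun i => (2 : Int) ^ (PySem.Int.mod i max_dilation).toNat)
  dilations.reverse.foldl (fun field dilation => field + (kernel_size - 1) * dilation) (1 + kernel_size - 1)

-- ===== PORT B =====
-- exponents max_dilation and r are ≥ 0 under Pre_ (n_layers > 0 → max_dilation ≥ 1), so Int pow on .toNat is exact.
def wavenet_max_fieldofvision_alt (max_dilation : Int) (n_layers : Int) (kernel_size : Int) : Int :=
  if n_layers ≤ 0 then kernel_size
  else
    let q := PySem.Int.floordiv n_layers max_dilation
    let r := PySem.Int.mod n_layers max_dilation
    let period_sum :=
      if q = 0 then (2 : Int) ^ r.toNat - 1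
      else q * ((2 : Int) ^ max_dilation.toNat - 1) + (2 : Int) ^ r.toNat - 1
    kernel_size + (kernel_size - 1) * period_sum

-- ===== PRECONDITION & SPEC =====
-- Pre_ excludes positive n_layers with non-positive max_dilation: there Python A raises
-- ZeroDivisionError (max_dilation = 0) or, via negative exponents, computes float powers so the
-- result is not an Int (except the accidental single-layer case n_layers = 1, where A still
-- returns an int but B's divmod-based closed form yields a float).
def Pre_wavenet_max_fieldofvision (max_dilation : Int) (n_layers : Int) (kernel_size : Int) : Prop :=
  n_layers ≤ 0 ∨ 1 ≤ max_dilation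
instance (max_dilation : Int) (n_layers : Int) (kernel_size : Int) : Decidable (Pre_wavenet_max_fieldofvision max_dilation n_layers kernel_size) := by unfold Pre_wavenet_max_fieldofvision; infer_instance
def pvWitness_wavenet_max_fieldofvision : Int × Int × Int := (3, 10, 2)

def Spec_wavenet_max_fieldofvision (max_dilation : Int) (n_layers : Int) (kernel_size : Int) (out : Int) : Prop := out = wavenet_max_fieldofvision_alt max_dilation n_layers kernel_size
instance (max_dilation : Int) (n_layers : Int) (kernel_size : Int) (out : Int) : Decidable (Spec_wavenet_max_fieldofvision max_dilation n_layers kernel_size out) := by unfold Spec_wavenet_max_fieldofvision; infer_instance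

-- ===== CLAIM (what is proved, stated in full; the proofs are below) =====
def Claim_equal_wavenet_max_fieldofvision : Prop := ∀ (max_dilation : Int) (n_layers : Int) (kernel_size : Int), Dom_wavenet_max_fieldofvision max_dilation n_layers kernel_size → Pre_wavenet_max_fieldofvision max_dilation n_layers kernel_size → Spec_wavenet_max_fieldofvision max_dilation n_layers kernel_size (wavenet_max_fieldofvision max_dilation n_layers kernel_size)

-- ===== LEMMAS AND PROOFS =====

-- folding `field + (k-1)*d` over a list adds (k-1) * sum
theorem pv_foldl_field (k : Int) : ∀ (l : List Int) (a : Int),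
    l.foldl (fun field d => field + (k - 1) * d) a = a + (k - 1) * l.sum := by
  intro l
  induction l with
  | nil => intro a; simp
  | cons x xs ih => intro a; simp [List.foldl_cons, ih]; ring

-- the geometric sum of the periodic dilation pattern
theorem pv_sum_pow_mod (M : Nat) (hM : 1 ≤ M) : ∀ (N : Nat),
    ((List.range N).map (fun j => (2 : Int) ^ (j % M))).sum
      = ((N / M : Nat) : Int) * ((2 : Int) ^ M - 1) + (2 : Int) ^ (N % M) - 1 := by
  intro N
  induction N with
  | zero => simp
  | succ N ih =>
    rw [List.range_succ, List.map_append, List.sum_append]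
    simp only [List.map_cons, List.map_nil, List.sum_cons, List.sum_nil, add_zero]
    have hr : N % M < M := Nat.mod_lt _ (by omega)
    have hcomm : M * (N / M) = (N / M) * M := Nat.mul_comm _ _
    have hdm := Nat.div_add_mod N M
    have hsplit : N + 1 = (N % M + 1) + (N / M) * M := by omega
    by_cases hcase : N % M + 1 < M
    · have hdiv : (N + 1) / M = N / M := by
        rw [hsplit, Nat.add_mul_div_right _ _ (by omega : 0 < M),
            Nat.div_eq_of_lt hcase, Nat.zero_add]
      have hmod : (N + 1) % M = N % M + 1 := by
        rw [hsplit, Nat.add_mul_mod_self_right, Nat.mod_eq_of_lt hcase]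
      rw [hdiv, hmod, ih]
      ring
    · have heq : N % M + 1 = M := by omega
      have hdiv : (N + 1) / M = N / M + 1 := by
        rw [hsplit, heq, Nat.add_mul_div_right _ _ (by omega : 0 < M),
            Nat.div_self (by omega : 0 < M)]
        omega
      have hmod : (N + 1) % M = 0 := by
        rw [hsplit, heq, Nat.add_mul_mod_self_right, Nat.mod_self]
      have hpow : (2 : Int) ^ M = 2 ^ (N % M) * 2 := by rw [← pow_succ, heq]
      rw [hdiv, hmod, ih, hpow]
      push_cast
      ring

-- ===== VERDICT (by name: the statement is the Claim_ definition above) =====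
theorem wavenet_max_fieldofvision_spec : Claim_equal_wavenet_max_fieldofvision := by
  unfold Claim_equal_wavenet_max_fieldofvision
  intro m n k _ hpre
  unfold Spec_wavenet_max_fieldofvision wavenet_max_fieldofvision wavenet_max_fieldofvision_alt
  by_cases hn : n ≤ 0
  · simp only [PySem.List.pyRange_one_eq_nil (by omega : n ≤ 0), List.map_nil,
      List.reverse_nil, List.foldl_nil, if_pos hn]
    ring
  · have hm : 1 ≤ m := hpre.resolve_left hn
    simp only [if_neg hn]
    set M := m.toNat with hMdef
    set N := n.toNat with hNdef
    have hmM : m = (M : Int) := by omega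
    have hnN : n = (N : Int) := by omega
    have hM1 : 1 ≤ M := by omega
    rw [pv_foldl_field, List.sum_reverse, hmM, hnN, PySem.List.pyRange_one]
    have h0 : ((N : Int) - 0).toNat = N := by omega
    rw [h0, List.map_map]
    have hmap : List.map
          ((fun i => (2 : Int) ^ (PySem.Int.mod i (M : Int)).toNat) ∘ fun (j : Nat) => (0 : Int) + ↑j)
          (List.range N)
        = List.map (fun j => (2 : Int) ^ (j % M)) (List.range N) := by
      apply List.map_congr_left
      intro j _
      simp only [Function.comp_apply, zero_add, PySem.Int.mod_natCast, Int.toNat_natCast]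
    rw [hmap, pv_sum_pow_mod M hM1 N,
        PySem.Int.floordiv_natCast, PySem.Int.mod_natCast, Int.toNat_natCast]
    by_cases hq : ((N / M : Nat) : Int) = 0
    · rw [if_pos hq, hq]; ring
    · rw [if_neg hq]; ring
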